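-- pv_equiv track=rewrite | github.com/physicsperson1/AdiabaticGases | Adiabatic_Gases.py | trimArrays
-- ===== SOURCE A (Python) =====
-- def trimArrays(ts,ys,t1,t2):
--     initIndex = 0
--     finalIndex = 0
--     for time in ts:
--         if time < t1:
--             initIndex += 1
--         else:
--             break
--     for time in ts:
--         if time < t2:
--             finalIndex += 1
--         else:
--             break
--     newTs = ts[initIndex:finalIndex]
--     newYs = ys[initIndex:finalIndex]
--     return newTs,newYs
-- ===== SOURCE B (Python) =====
-- def trimArrays(ts, ys, t1, t2):
--     # one fused pass computes both prefix lengths; A scans ts twice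
--     i = j = 0
--     si = sj = True
--     for t in ts:
--         if si and t < t1:
--             i += 1
--         else:
--             si = False
--         if sj and t < t2:
--             j += 1
--         else:
--             sj = False
--         if not (si or sj):
--             break
--     return ts[i:j], ys[i:j]
-- ===== Notes on version B (the rewrite author's own statement) =====
-- stated objective: alternative
-- what changed: B fuses A's two independent break-on-first-failure scans of ts into a single pass that maintains both prefix counters and two still-scanning flags, stopping as soon as both scans are done.
import Mathlib
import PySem

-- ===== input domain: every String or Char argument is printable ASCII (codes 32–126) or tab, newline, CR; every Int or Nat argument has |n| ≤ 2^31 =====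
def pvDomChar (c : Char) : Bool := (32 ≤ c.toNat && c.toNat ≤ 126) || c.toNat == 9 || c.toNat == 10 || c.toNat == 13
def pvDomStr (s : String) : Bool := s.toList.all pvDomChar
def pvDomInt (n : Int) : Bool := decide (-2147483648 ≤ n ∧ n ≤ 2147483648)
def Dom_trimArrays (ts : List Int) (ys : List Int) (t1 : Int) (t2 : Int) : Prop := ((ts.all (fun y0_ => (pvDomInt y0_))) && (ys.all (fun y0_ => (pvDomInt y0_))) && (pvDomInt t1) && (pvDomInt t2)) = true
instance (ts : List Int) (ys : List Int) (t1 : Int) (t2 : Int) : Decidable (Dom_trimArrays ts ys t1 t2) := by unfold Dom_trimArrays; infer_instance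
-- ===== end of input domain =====

-- B fuses A's two break-on-first-failure scans of ts into one pass; same O(n) cost, alternative structure.

-- ===== PORT A =====
-- A's 'for time in ts: if time < bound: counter += 1 else: break' loop
def trimCount (ts : List Int) (bound : Int) (acc : Int) : Int :=
  match ts with
  | [] => acc
  | time :: rest => if time < bound then trimCount rest bound (acc + 1) else acc

def trimArrays (ts : List Int) (ys : List Int) (t1 : Int) (t2 : Int) : List Int × List Int :=
  let initIndex := trimCount ts t1 0
  let finalIndex := trimCount ts t2 0
  let newTs := PySem.List.slice ts (some initIndex) (some finalIndex)
  let newYs := PySem.List.slice ys (some initIndex) (some finalIndex)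
  (newTs, newYs)

-- ===== PORT B =====
-- B's single fused loop: two counters i j, two still-scanning flags si sj, break when both done
def scanBoth (ts : List Int) (t1 t2 : Int) (si sj : Bool) (i j : Int) : Int × Int :=
  match ts with
  | [] => (i, j)
  | t :: rest =>
    let p1 : Bool × Int := if si && decide (t < t1) then (true, i + 1) else (false, i)
    let p2 : Bool × Int := if sj && decide (t < t2) then (true, j + 1) else (false, j)
    if !(p1.1 || p2.1) then (p1.2, p2.2)
    else scanBoth rest t1 t2 p1.1 p2.1 p1.2 p2.2

def trimArrays_alt (ts : List Int) (ys : List Int) (t1 : Int) (t2 : Int) : List Int × List Int :=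
  let ij := scanBoth ts t1 t2 true true 0 0
  (PySem.List.slice ts (some ij.1) (some ij.2), PySem.List.slice ys (some ij.1) (some ij.2))

-- ===== PRECONDITION & SPEC =====
def Spec_trimArrays (ts : List Int) (ys : List Int) (t1 : Int) (t2 : Int) (out : List Int × List Int) : Prop := out = trimArrays_alt ts ys t1 t2
instance (ts : List Int) (ys : List Int) (t1 : Int) (t2 : Int) (out : List Int × List Int) : Decidable (Spec_trimArrays ts ys t1 t2 out) := by unfold Spec_trimArrays; infer_instance

-- ===== CLAIM (what is proved, stated in full; the proofs are below) =====
def Claim_equal_trimArrays : Prop := ∀ (ts : List Int) (ys : List Int) (t1 : Int) (t2 : Int), Dom_trimArrays ts ys t1 t2 → Spec_trimArrays ts ys t1 t2 (trimArrays ts ys t1 t2)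

-- ===== LEMMAS AND PROOFS =====
lemma scanBoth_eq (ts : List Int) (t1 t2 : Int) :
    ∀ (si sj : Bool) (i j : Int),
      scanBoth ts t1 t2 si sj i j =
        ((if si then trimCount ts t1 i else i), (if sj then trimCount ts t2 j else j)) := by
  induction ts with
  | nil => intro si sj i j; simp [scanBoth, trimCount]
  | cons t rest ih =>
    intro si sj i j
    by_cases h1 : t < t1 <;> by_cases h2 : t < t2 <;>
      cases si <;> cases sj <;>
        simp [scanBoth, trimCount, h1, h2, ih]

-- ===== VERDICT (by name: the statement is the Claim_ definition above) =====
theorem trimArrays_spec : Claim_equal_trimArrays := by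
  intro ts ys t1 t2 _
  unfold Spec_trimArrays trimArrays trimArrays_alt
  simp [scanBoth_eq]
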